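-- pv_equiv track=rewrite | github.com/thesparkvision/AdventOfCode | 2023/day3/part2/main.py | find_gear_ratios
-- ===== SOURCE A (Python) =====
-- def is_valid_cell(i, j, length, height):
--     return  0 <= i < height and 0 <= j < length
--
-- def is_cell_number(i, j, engine_schematic):
--     return ord('0') <= ord(engine_schematic[i][j]) <= ord('9')
--
-- def construct_neighbour_coordinates(i,j):
--     top_left = i-1, j-1
--     top_center = i-1, j
--     top_right = i-1, j+1
--     center_left = i, j-1
--     center_right = i, j+1
--     bottom_left = i+1, j-1
--     bottom_center = i+1, j
--     bottom_right = i+1, j+1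
--
--     return [
--         top_left,
--         top_center,
--         top_right,
--         center_left,
--         center_right,
--         bottom_left,
--         bottom_center,
--         bottom_right
--     ]
--
-- def find_complete_part_number(ni, nj, engine_schematic):
--     complete_part_number = ""
--     complete_part_number += engine_schematic[ni][nj]
--     rel_left = nj - 1
--     rel_right = nj + 1
--     length = len(engine_schematic[ni])
--
--     while rel_left >= 0:
--         if is_cell_number(ni, rel_left, engine_schematic):
--             complete_part_number = engine_schematic[ni][rel_left] + complete_part_number
--         else:
--             break
--         rel_left -= 1
--
--     while rel_right < length:
--         if is_cell_number(ni, rel_right, engine_schematic):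
--             complete_part_number += engine_schematic[ni][rel_right]
--         else:
--             break
--         rel_right += 1
--
--     complete_part_number = int(complete_part_number)
--     return complete_part_number
--
-- def find_gear_ratio(found_part_numbers):
--     gear_ratio = 0
--     mult = 1
--
--     if len(found_part_numbers) < 2:
--         return gear_ratio
--
--     for part_number in found_part_numbers:
--         mult*= part_number
--
--     if mult > 1:
--         gear_ratio = mult
--
--     return gear_ratio
--
-- def find_gear_ratios(engine_schematic):
--     gear_ratios = list()
--     height = len(engine_schematic)
--     length = len(engine_schematic[0])
--
--     for i in range(0, height):
--         for j in range(0, length):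
--
--             cell_val = engine_schematic[i][j]
--             if cell_val != "*":
--                 continue
--
--             neighbouring_coordinates = construct_neighbour_coordinates(i, j)
--             found_part_numbers = set()
--             for neighbouring_coordinate in neighbouring_coordinates:
--                 ni, nj = neighbouring_coordinate
--
--                 if (
--                     is_valid_cell(ni, nj, length, height) and
--                     is_cell_number(ni, nj, engine_schematic)
--                 ):
--                     part_number = find_complete_part_number(ni, nj, engine_schematic)
--                     if part_number not in found_part_numbers:
--                         found_part_numbers.add(part_number)
--
--             gear_ratio = find_gear_ratio(found_part_numbers)
--             gear_ratios.append(gear_ratio)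
--
--     return gear_ratios
-- ===== SOURCE B (Python) =====
-- def _num_row(row):
--     # one pass: vals[j] = value of the maximal digit run containing j, else None
--     vals = []
--     L = len(row)
--     j = 0
--     while j < L:
--         if '0' <= row[j] <= '9':
--             k = j + 1
--             while k < L and '0' <= row[k] <= '9':
--                 k += 1
--             v = int(row[j:k])
--             vals.extend([v] * (k - j))
--             j = k
--         else:
--             vals.append(None)
--             j += 1
--     return vals
--
-- def find_gear_ratios(engine_schematic):
--     if not any('*' in row for row in engine_schematic):
--         return []
--     height = len(engine_schematic)
--     width = len(engine_schematic[0])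
--     num_at = [_num_row(row) for row in engine_schematic]
--     out = []
--     for i in range(height):
--         for j in range(width):
--             if engine_schematic[i][j] != '*':
--                 continue
--             vals = []
--             for ni in (i - 1, i, i + 1):
--                 if 0 <= ni < height:
--                     row_vals = num_at[ni]
--                     for nj in (j - 1, j, j + 1):
--                         if 0 <= nj < width:
--                             v = row_vals[nj]
--                             if v is not None and v not in vals:
--                                 vals.append(v)
--             p = 1
--             for v in vals:
--                 p *= v
--             out.append(p if len(vals) >= 2 and p > 1 else 0)
--     return out
-- ===== Notes on version B (the rewrite author's own statement) =====
-- stated objective: faster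
-- what changed: B exits immediately when no row contains a '*', and otherwise precomputes, in one pass per row, a table mapping every digit cell to the value of its complete number, so each '*' just looks up its eight neighbours instead of re-scanning the row left and right (and re-parsing) per digit neighbour as A does.
import Mathlib
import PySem

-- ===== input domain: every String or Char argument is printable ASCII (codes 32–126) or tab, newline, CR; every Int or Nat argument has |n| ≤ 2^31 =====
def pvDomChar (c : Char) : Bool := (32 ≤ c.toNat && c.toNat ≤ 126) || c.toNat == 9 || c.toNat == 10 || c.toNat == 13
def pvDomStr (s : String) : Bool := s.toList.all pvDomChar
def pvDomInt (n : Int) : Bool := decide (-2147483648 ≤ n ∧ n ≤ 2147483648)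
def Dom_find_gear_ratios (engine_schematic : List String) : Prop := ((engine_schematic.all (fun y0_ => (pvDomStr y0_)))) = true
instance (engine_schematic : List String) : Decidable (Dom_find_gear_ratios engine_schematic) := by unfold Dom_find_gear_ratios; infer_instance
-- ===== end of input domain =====

-- B returns [] at once when no row contains '*', and otherwise replaces A's
-- per-neighbour left/right digit rescans by a one-pass per-row table mapping
-- each digit cell to its complete number (objective: faster).

-- ===== PORT A =====
-- shared cell accessors (both Pythons index engine_schematic[i][j] the same way)
def pvIsDigit (c : Char) : Bool := decide ('0' ≤ c) && decide (c ≤ '9')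
def pvRowOf (es : List String) (i : Int) : List Char :=
  ((PySem.List.pyGet? es i).getD "").toList
def pvCell (es : List String) (i j : Int) : Char :=
  (PySem.List.pyGet? (pvRowOf es i) j).getD ' '

def pvIsValidCell (i j length height : Int) : Bool :=
  decide (0 ≤ i ∧ i < height) && decide (0 ≤ j ∧ j < length)

def pvNeighbours (i j : Int) : List (Int × Int) :=
  [(i-1, j-1), (i-1, j), (i-1, j+1), (i, j-1), (i, j+1), (i+1, j-1), (i+1, j), (i+1, j+1)]

-- A's left while-loop: fuel k = rel_left + 1 (loop runs while rel_left >= 0)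
def pvLeftScan (row : List Char) : Nat → List Char → List Char
  | 0, acc => acc
  | k+1, acc =>
    let c := row.getD k ' '
    if pvIsDigit c then pvLeftScan row k (c :: acc) else acc

-- A's right while-loop: fuel f = length - rel_right (loop runs while rel_right < length)
def pvRightScan (row : List Char) : Nat → Nat → List Char → List Char
  | 0, _, acc => acc
  | f+1, rr, acc =>
    let c := row.getD rr ' '
    if pvIsDigit c then pvRightScan row f (rr+1) (acc ++ [c]) else acc

-- only ever called with 0 ≤ nj (guarded by is_valid_cell), so nj.toNat is exact
def pvFindComplete (ni nj : Int) (es : List String) : Int :=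
  (PySem.Int.ofChars?
    (pvRightScan (pvRowOf es ni) ((pvRowOf es ni).length - (nj.toNat + 1)) (nj.toNat + 1)
      (pvLeftScan (pvRowOf es ni) nj.toNat [(PySem.List.pyGet? (pvRowOf es ni) nj).getD ' ']))).getD 0

def pvGearRatio (found : List Int) : Int :=
  if found.length < 2 then 0
  else
    let mult := found.foldl (· * ·) 1
    if mult > 1 then mult else 0

def find_gear_ratios (engine_schematic : List String) : List Int :=
  let height : Int := engine_schematic.length
  let length : Int := (pvRowOf engine_schematic 0).length
  (PySem.List.pyRange 0 height 1).foldl (fun gs i =>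
    (PySem.List.pyRange 0 length 1).foldl (fun gs j =>
      if pvCell engine_schematic i j ≠ '*' then gs
      else
        let found := (pvNeighbours i j).foldl (fun found nc =>
          if pvIsValidCell nc.1 nc.2 length height
              && pvIsDigit (pvCell engine_schematic nc.1 nc.2) then
            PySem.Set.add found (pvFindComplete nc.1 nc.2 engine_schematic)
          else found) PySem.Set.empty
        gs ++ [pvGearRatio found]) gs) []

-- ===== PORT B =====
-- B's inner while: k advances over the digits of the run
def pvTakeDigits : List Char → List Char
  | [] => []
  | c :: r => if pvIsDigit c then c :: pvTakeDigits r else []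

-- B's _num_row: one pass, every cell of a digit run maps to the run's value
def pvNumRow : List Char → List (Option Int)
  | [] => []
  | c :: rest =>
    if pvIsDigit c then
      some ((PySem.Int.ofChars? (c :: pvTakeDigits rest)).getD 0) ::
        (List.replicate (pvTakeDigits rest).length
            (some ((PySem.Int.ofChars? (c :: pvTakeDigits rest)).getD 0)) ++
          pvNumRow (rest.drop (pvTakeDigits rest).length))
    else
      none :: pvNumRow rest
termination_by row => row.length
decreasing_by all_goals (simp only [List.length_drop, List.length_cons]; omega)

def find_gear_ratios_alt (engine_schematic : List String) : List Int :=
  if !(engine_schematic.any (fun row => PySem.Str.isIn "*" row)) then []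
  else
  let height : Int := engine_schematic.length
  let width : Int := (pvRowOf engine_schematic 0).length
  let numAt : List (List (Option Int)) := engine_schematic.map (fun r => pvNumRow r.toList)
  (PySem.List.pyRange 0 height 1).foldl (fun out i =>
    (PySem.List.pyRange 0 width 1).foldl (fun out j =>
      if pvCell engine_schematic i j ≠ '*' then out
      else
        let vals : List Int := [i-1, i, i+1].foldl (fun vals ni =>
          if 0 ≤ ni ∧ ni < height then
            let rowVals := (PySem.List.pyGet? numAt ni).getD []
            [j-1, j, j+1].foldl (fun (vals : List Int) nj =>
              if 0 ≤ nj ∧ nj < width then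
                match (PySem.List.pyGet? rowVals nj).getD none with
                | some v => if v ∈ vals then vals else vals ++ [v]
                | none => vals
              else vals) vals
          else vals) ([] : List Int)
        let p : Int := vals.foldl (· * ·) 1
        out ++ [if 2 ≤ vals.length ∧ 1 < p then p else 0]) out) []

-- ===== PRECONDITION & SPEC =====
-- Pre_ is exactly where the Python A returns: a non-empty schematic (A indexes
-- engine_schematic[0]) whose every row has at least len(row 0) characters
-- (A indexes row[i][j] for all j < len(row 0): shorter rows raise IndexError).
def Pre_find_gear_ratios (engine_schematic : List String) : Prop :=
  match engine_schematic with
  | [] => False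
  | r :: _ => ∀ s ∈ engine_schematic, r.toList.length ≤ s.toList.length
instance (engine_schematic : List String) : Decidable (Pre_find_gear_ratios engine_schematic) := by
  unfold Pre_find_gear_ratios; cases engine_schematic <;> infer_instance

def pvWitness_find_gear_ratios : List String := ["12*3"]

def Spec_find_gear_ratios (engine_schematic : List String) (out : List Int) : Prop := out = find_gear_ratios_alt engine_schematic
instance (engine_schematic : List String) (out : List Int) : Decidable (Spec_find_gear_ratios engine_schematic out) := by unfold Spec_find_gear_ratios; infer_instance

-- ===== CLAIM (what is proved, stated in full; the proofs are below) =====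
def Claim_equal_find_gear_ratios : Prop := ∀ (engine_schematic : List String), Dom_find_gear_ratios engine_schematic → Pre_find_gear_ratios engine_schematic → Spec_find_gear_ratios engine_schematic (find_gear_ratios engine_schematic)

-- ===== LEMMAS AND PROOFS =====

-- run value at a digit cell: the maximal digit run through position j, parsed like int()
def pvRunChars (row : List Char) (j : Nat) : List Char :=
  ((row.take j).reverse.takeWhile pvIsDigit).reverse ++ (row.drop j).takeWhile pvIsDigit

def pvRunVal (row : List Char) (j : Nat) : Int :=
  (PySem.Int.ofChars? (pvRunChars row j)).getD 0

def pvLookup (es : List String) (W H ni nj : Int) : Option Int :=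
  if 0 ≤ ni ∧ ni < H ∧ 0 ≤ nj ∧ nj < W ∧ pvIsDigit (pvCell es ni nj) = true then
    some (pvRunVal (pvRowOf es ni) nj.toNat)
  else none

def pvNStep (es : List String) (W H : Int) (found : List Int) (c : Int × Int) : List Int :=
  match pvLookup es W H c.1 c.2 with
  | some v => if v ∈ found then found else found ++ [v]
  | none => found

lemma pv_mem_takeWhile {p : Char → Bool} : ∀ {xs : List Char} {x : Char},
    x ∈ xs.takeWhile p → p x = true := by
  intro xs
  induction xs with
  | nil => intro x h; simp at h
  | cons c r ih =>
    intro x h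
    by_cases hc : p c
    · simp only [List.takeWhile_cons, hc, if_true, List.mem_cons] at h
      rcases h with rfl | h
      · exact hc
      · exact ih h
    · simp [hc] at h

lemma pv_takeWhile_dropWhile (p : Char → Bool) (l : List Char) :
    (l.dropWhile p).takeWhile p = [] := by
  induction l with
  | nil => simp
  | cons c r ih => by_cases h : p c <;> simp [h, ih]

lemma pv_takeWhile_append_not {p : Char → Bool} {x : Char} (m : List Char) :
    ∀ (l : List Char), x ∈ l → p x = false → (l ++ m).takeWhile p = l.takeWhile p := by
  intro l
  induction l with
  | nil => intro hx; simp at hx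
  | cons c r ih =>
    intro hx hp
    by_cases h : p c
    · simp only [List.cons_append, List.takeWhile_cons, h, if_true]
      rcases List.mem_cons.mp hx with heq | hx'
      · rw [heq] at hp; rw [hp] at h; cases h
      · rw [ih hx' hp]
    · simp [h]

lemma pv_takeWhile_append_singleton {p : Char → Bool} {c : Char} (hc : p c = false) :
    ∀ (l : List Char), (l ++ [c]).takeWhile p = l.takeWhile p := by
  intro l
  induction l with
  | nil => simp [hc]
  | cons a r ih => by_cases h : p a <;> simp [h, ih]

lemma pvLeftScan_eq (row : List Char) :
    ∀ (k : Nat) (acc : List Char), k ≤ row.length →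
      pvLeftScan row k acc = ((row.take k).reverse.takeWhile pvIsDigit).reverse ++ acc := by
  intro k
  induction k with
  | zero => intro acc _; simp [pvLeftScan]
  | succ n ih =>
    intro acc hk
    have hn : n < row.length := by omega
    have htake : row.take (n+1) = row.take n ++ [row[n]] := List.take_succ_eq_append_getElem hn
    have hgd : row.getD n ' ' = row[n] := List.getD_eq_getElem row ' ' hn
    by_cases hd : pvIsDigit row[n] = true
    · simp only [pvLeftScan, hgd, hd, if_true]
      rw [ih (row[n] :: acc) (by omega), htake, List.reverse_append]
      simp only [List.reverse_cons, List.reverse_nil, List.nil_append, List.singleton_append]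
      rw [List.takeWhile_cons, if_pos hd]
      simp [List.append_assoc]
    · simp only [pvLeftScan, hgd, hd]
      rw [htake, List.reverse_append]
      simp only [List.reverse_cons, List.reverse_nil, List.nil_append, List.singleton_append]
      rw [List.takeWhile_cons, if_neg hd]
      simp

lemma pvRightScan_eq (row : List Char) :
    ∀ (f rr : Nat) (acc : List Char), f = row.length - rr →
      pvRightScan row f rr acc = acc ++ (row.drop rr).takeWhile pvIsDigit := by
  intro f
  induction f with
  | zero =>
    intro rr acc hf
    have : row.length ≤ rr := by omega
    simp [pvRightScan, List.drop_eq_nil_of_le this]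
  | succ n ih =>
    intro rr acc hf
    have hrr : rr < row.length := by omega
    have hdrop : row.drop rr = row[rr] :: row.drop (rr+1) := List.drop_eq_getElem_cons hrr
    have hgd : row.getD rr ' ' = row[rr] := List.getD_eq_getElem row ' ' hrr
    by_cases hd : pvIsDigit row[rr] = true
    · simp only [pvRightScan, hgd, hd, if_true]
      rw [ih (rr+1) (acc ++ [row[rr]]) (by omega), hdrop]
      rw [List.takeWhile_cons, if_pos hd]
      simp [List.append_assoc]
    · simp only [pvRightScan, hgd, hd]
      rw [hdrop, List.takeWhile_cons, if_neg hd]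
      simp

lemma pvFindComplete_eq (es : List String) (ni nj : Int) (h0 : 0 ≤ nj)
    (h1 : nj.toNat < (pvRowOf es ni).length)
    (hd : pvIsDigit ((pvRowOf es ni)[nj.toNat]) = true) :
    pvFindComplete ni nj es = pvRunVal (pvRowOf es ni) nj.toNat := by
  unfold pvFindComplete pvRunVal pvRunChars
  have hget : PySem.List.pyGet? (pvRowOf es ni) nj = some ((pvRowOf es ni)[nj.toNat]) :=
    PySem.List.pyGet?_eq_some_getElem _ h0 (by omega)
  rw [hget]
  simp only [Option.getD_some]
  rw [pvLeftScan_eq _ nj.toNat _ (by omega)]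
  rw [pvRightScan_eq _ _ _ _ rfl]
  have hTW : ((pvRowOf es ni).drop nj.toNat).takeWhile pvIsDigit
      = (pvRowOf es ni)[nj.toNat] :: ((pvRowOf es ni).drop (nj.toNat+1)).takeWhile pvIsDigit := by
    rw [List.drop_eq_getElem_cons h1, List.takeWhile_cons, if_pos hd]
  rw [hTW]
  simp [List.append_assoc]

lemma pvTakeDigits_eq : ∀ xs : List Char, pvTakeDigits xs = xs.takeWhile pvIsDigit := by
  intro xs
  induction xs with
  | nil => rfl
  | cons c r ih => by_cases h : pvIsDigit c <;> simp [pvTakeDigits, h, ih]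

lemma pvNumRow_length : ∀ (n : Nat) (row : List Char), row.length ≤ n →
    (pvNumRow row).length = row.length := by
  intro n
  induction n with
  | zero =>
    intro row h
    have : row = [] := List.length_eq_zero_iff.mp (by omega)
    subst this; simp [pvNumRow]
  | succ n ih =>
    intro row h
    match row with
    | [] => simp [pvNumRow]
    | c :: rest =>
      by_cases hc : pvIsDigit c = true
      · rw [pvNumRow]
        rw [if_pos hc]
        have hlen : (rest.drop (pvTakeDigits rest).length).length ≤ n := by
          have := List.length_drop (l := rest) (i := (pvTakeDigits rest).length)
          simp only [List.length_cons] at h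
          omega
        simp only [List.length_cons, List.length_append, List.length_replicate,
          ih _ hlen, List.length_drop]
        rw [pvTakeDigits_eq]
        have := (List.takeWhile_sublist (p := pvIsDigit) (l := rest)).length_le
        simp only [List.length_cons] at h ⊢
        omega
      · rw [pvNumRow, if_neg hc]
        simp only [List.length_cons] at h ⊢
        rw [ih rest (by omega)]

lemma pvNumRow_spec : ∀ (n : Nat) (row : List Char), row.length ≤ n →
    ∀ (j : Nat), j < row.length →
      (pvNumRow row).getD j none =
        (if pvIsDigit (row.getD j ' ') = true then some (pvRunVal row j) else none) := by
  intro n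
  induction n with
  | zero => intro row h j hj; omega
  | succ n ih =>
    intro row h j hj
    match row with
    | [] => simp at hj
    | c :: rest =>
      by_cases hc : pvIsDigit c = true
      · obtain ⟨ds, rst, hds, hrst, hsplit⟩ :
            ∃ ds rst, ds = rest.takeWhile pvIsDigit ∧ rst = rest.dropWhile pvIsDigit ∧
              rest = ds ++ rst :=
          ⟨_, _, rfl, rfl, (List.takeWhile_append_dropWhile).symm⟩
        subst hsplit
        have hallds : ∀ x ∈ ds, pvIsDigit x = true := by
          intro x hx
          exact pv_mem_takeWhile (p := pvIsDigit) (xs := ds ++ rst) (by rw [← hds]; exact hx)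
        have hall : ∀ x ∈ c :: ds, pvIsDigit x = true := by
          intro x hx
          rcases List.mem_cons.mp hx with rfl | hx'
          · exact hc
          · exact hallds x hx'
        have htwrst : rst.takeWhile pvIsDigit = [] := by
          conv_lhs => rw [hrst]
          exact pv_takeWhile_dropWhile _ _
        have htwds : (ds ++ rst).takeWhile pvIsDigit = ds := by
          rw [List.takeWhile_append_of_pos hallds, htwrst, List.append_nil]
        have hdsne0 : rst ≠ [] → pvIsDigit (rst.getD 0 ' ') = false := by
          intro hne
          match rst, hne with
          | x :: xs, _ =>
            simp only [List.getD_cons_zero]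
            by_cases hx : pvIsDigit x = true
            · rw [List.takeWhile_cons, if_pos hx] at htwrst; cases htwrst
            · simpa using hx
        rw [pvNumRow, if_pos hc, pvTakeDigits_eq, htwds, List.drop_left]
        rcases j with _ | t
        · simp only [List.getD_cons_zero, hc, if_true]
          have hrun : pvRunChars (c :: (ds ++ rst)) 0 = c :: ds := by
            unfold pvRunChars
            simp only [List.take_zero, List.reverse_nil, List.takeWhile_nil, List.nil_append,
              List.drop_zero]
            rw [List.takeWhile_cons, if_pos hc, htwds]
          simp [pvRunVal, hrun]
        · simp only [List.getD_cons_succ]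
          by_cases ht : t < ds.length
          · have hL : (List.replicate ds.length (some ((PySem.Int.ofChars? (c :: ds)).getD 0))
                ++ pvNumRow rst).getD t none
                = some ((PySem.Int.ofChars? (c :: ds)).getD 0) := by
              rw [List.getD_eq_getElem?_getD, List.getElem?_append_left (by simpa using ht),
                List.getElem?_replicate_of_lt ht]
              rfl
            rw [hL]
            have hgd : (ds ++ rst).getD t ' ' = ds.getD t ' ' := by
              rw [List.getD_eq_getElem?_getD, List.getElem?_append_left ht,
                ← List.getD_eq_getElem?_getD]
            have hdig : pvIsDigit ((ds ++ rst).getD t ' ') = true := by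
              rw [hgd, List.getD_eq_getElem _ _ ht]
              exact hallds _ (List.getElem_mem ht)
            rw [if_pos hdig]
            have hrun : pvRunChars (c :: (ds ++ rst)) (t+1) = c :: ds := by
              unfold pvRunChars
              have htake : (c :: (ds ++ rst)).take (t+1) = (c :: ds).take (t+1) := by
                rw [show c :: (ds ++ rst) = (c :: ds) ++ rst from rfl]
                exact List.take_append_of_le_length (by simp; omega)
              have hdrp : (c :: (ds ++ rst)).drop (t+1) = (c :: ds).drop (t+1) ++ rst := by
                rw [show c :: (ds ++ rst) = (c :: ds) ++ rst from rfl]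
                exact List.drop_append_of_le_length (by simp; omega)
              rw [htake, hdrp]
              have hall2 : ∀ x ∈ ((c :: ds).take (t+1)).reverse, pvIsDigit x = true := fun x hx =>
                hall _ (List.mem_of_mem_take (List.mem_reverse.mp hx))
              have hall3 : ∀ x ∈ (c :: ds).drop (t+1), pvIsDigit x = true := fun x hx =>
                hall _ (List.mem_of_mem_drop hx)
              rw [List.takeWhile_eq_self_iff.mpr hall2, List.reverse_reverse,
                List.takeWhile_append_of_pos hall3, htwrst, List.append_nil,
                List.take_append_drop]
            simp [pvRunVal, hrun]
          · have hmle : ds.length ≤ t := by omega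
            have hlensum : (c :: (ds ++ rst)).length = ds.length + rst.length + 1 := by
              simp only [List.length_cons, List.length_append]
            have hulen : t - ds.length < rst.length := by omega
            have hrecn : rst.length ≤ n := by
              simp only [List.length_cons, List.length_append] at h
              omega
            have hL : (List.replicate ds.length (some ((PySem.Int.ofChars? (c :: ds)).getD 0))
                ++ pvNumRow rst).getD t none = (pvNumRow rst).getD (t - ds.length) none := by
              rw [List.getD_eq_getElem?_getD,
                List.getElem?_append_right (by simpa using hmle)]
              simp [List.getD_eq_getElem?_getD]
            rw [hL, ih rst hrecn (t - ds.length) hulen]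
            have hgd : (ds ++ rst).getD t ' ' = rst.getD (t - ds.length) ' ' := by
              rw [List.getD_eq_getElem?_getD, List.getElem?_append_right hmle,
                ← List.getD_eq_getElem?_getD]
            rw [hgd]
            by_cases hd : pvIsDigit (rst.getD (t - ds.length) ' ') = true
            · rw [if_pos hd, if_pos hd]
              have h0lt : 0 < rst.length := by omega
              have hne : rst ≠ [] := by
                intro hh; rw [hh] at h0lt; simp at h0lt
              have hu0 : 0 < t - ds.length := by
                rcases Nat.eq_zero_or_pos (t - ds.length) with h00 | h00
                · exfalso
                  rw [h00] at hd
                  rw [hdsne0 hne] at hd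
                  cases hd
                · exact h00
              congr 1
              unfold pvRunVal
              congr 1
              unfold pvRunChars
              have hidx : t + 1 = (c :: ds).length + (t - ds.length) := by
                simp only [List.length_cons]; omega
              have htake : (c :: (ds ++ rst)).take (t+1)
                  = (c :: ds) ++ rst.take (t - ds.length) := by
                rw [show c :: (ds ++ rst) = (c :: ds) ++ rst from rfl, hidx,
                  List.take_append, List.take_of_length_le (by omega),
                  Nat.add_sub_cancel_left]
              have hdrp : (c :: (ds ++ rst)).drop (t+1) = rst.drop (t - ds.length) := by
                rw [show c :: (ds ++ rst) = (c :: ds) ++ rst from rfl, hidx]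
                exact List.drop_length_add_append ..
              rw [htake, hdrp, List.reverse_append]
              have hx0mem : rst[0]'h0lt ∈ (rst.take (t - ds.length)).reverse := by
                rw [List.mem_reverse]
                have h00 : (rst.take (t - ds.length))[0]'(by simp [List.length_take]; omega)
                    = rst[0]'h0lt := List.getElem_take ..
                rw [← h00]
                exact List.getElem_mem _
              have hx0d : pvIsDigit (rst[0]'h0lt) = false := by
                have := hdsne0 hne
                rwa [List.getD_eq_getElem _ _ h0lt] at this
              rw [pv_takeWhile_append_not _ _ hx0mem hx0d]
            · rw [if_neg hd, if_neg hd]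
      · rw [pvNumRow, if_neg hc]
        rcases j with _ | t
        · simp [hc]
        · simp only [List.getD_cons_succ]
          have htlen : t < rest.length := by
            simp only [List.length_cons] at hj; omega
          rw [ih rest (by simp only [List.length_cons] at h; omega) t htlen]
          by_cases hd : pvIsDigit (rest.getD t ' ') = true
          · rw [if_pos hd, if_pos hd]
            have hcf : pvIsDigit c = false := by simpa using hc
            congr 1
            unfold pvRunVal
            congr 1
            unfold pvRunChars
            rw [show (c :: rest).take (t+1) = c :: rest.take t from by simp,
              show (c :: rest.take t).reverse = (rest.take t).reverse ++ [c] from by simp,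
              pv_takeWhile_append_singleton hcf]
            rfl
          · rw [if_neg hd, if_neg hd]

lemma pv_pre_len (es : List String) (hpre : Pre_find_gear_ratios es) :
    ∀ s ∈ es, (pvRowOf es 0).length ≤ s.toList.length := by
  match es with
  | [] => exact absurd hpre (by simp [Pre_find_gear_ratios])
  | r :: tl =>
    have : pvRowOf (r :: tl) 0 = r.toList := by
      simp [pvRowOf]
    rw [this]
    exact hpre

lemma pvRowOf_get (es : List String) (ni : Int) (h0 : 0 ≤ ni) (h1 : ni < es.length) :
    pvRowOf es ni = (es[ni.toNat]'(by omega)).toList := by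
  unfold pvRowOf
  rw [PySem.List.pyGet?_eq_some_getElem es h0 h1]
  rfl

lemma pvStepA_eq (es : List String)
    (hlen : ∀ s ∈ es, (pvRowOf es 0).length ≤ s.toList.length)
    (found : List Int) (c : Int × Int) :
    (if pvIsValidCell c.1 c.2 ((pvRowOf es 0).length : Int) (es.length : Int)
        && pvIsDigit (pvCell es c.1 c.2) then
      PySem.Set.add found (pvFindComplete c.1 c.2 es)
    else found)
    = pvNStep es ((pvRowOf es 0).length : Int) (es.length : Int) found c := by
  obtain ⟨ni, nj⟩ := c
  simp only [pvNStep, pvLookup]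
  by_cases hb : 0 ≤ ni ∧ ni < (es.length : Int) ∧ 0 ≤ nj ∧ nj < ((pvRowOf es 0).length : Int)
  · obtain ⟨h1, h2, h3, h4⟩ := hb
    have hni : ni.toNat < es.length := by omega
    have hrowdef : pvRowOf es ni = (es[ni.toNat]'hni).toList := pvRowOf_get es ni h1 h2
    have hWrow : (pvRowOf es 0).length ≤ (pvRowOf es ni).length := by
      rw [hrowdef]; exact hlen _ (List.getElem_mem hni)
    have hnj : nj.toNat < (pvRowOf es ni).length := by omega
    have hcell : pvCell es ni nj = (pvRowOf es ni)[nj.toNat] := by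
      unfold pvCell
      rw [PySem.List.pyGet?_eq_some_getElem _ h3 (by omega)]
      rfl
    have hvalid : pvIsValidCell ni nj ((pvRowOf es 0).length : Int) (es.length : Int) = true := by
      simp only [pvIsValidCell, Bool.and_eq_true, decide_eq_true_eq]
      exact ⟨⟨h1, h2⟩, h3, h4⟩
    rw [hcell, hvalid]
    by_cases hd : pvIsDigit ((pvRowOf es ni)[nj.toNat]) = true
    · have hcond : 0 ≤ ni ∧ ni < (es.length : Int) ∧ 0 ≤ nj ∧
          nj < ((pvRowOf es 0).length : Int) ∧ pvIsDigit ((pvRowOf es ni)[nj.toNat]) = true :=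
        ⟨h1, h2, h3, h4, hd⟩
      rw [if_pos hcond]
      conv_lhs => rw [hd]
      rw [if_pos (show ((true && true) = true) from rfl)]
      rw [pvFindComplete_eq es ni nj h3 hnj hd]
      by_cases hv : pvRunVal (pvRowOf es ni) nj.toNat ∈ found
      · simp [PySem.Set.add, PySem.Set.contains, hv]
      · simp [PySem.Set.add, PySem.Set.contains, hv]
    · have hdf : pvIsDigit ((pvRowOf es ni)[nj.toNat]) = false := by simpa using hd
      have hnot : ¬ (0 ≤ ni ∧ ni < (es.length : Int) ∧ 0 ≤ nj ∧
          nj < ((pvRowOf es 0).length : Int) ∧ pvIsDigit ((pvRowOf es ni)[nj.toNat]) = true) :=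
        fun hh => hd hh.2.2.2.2
      rw [if_neg hnot]
      conv_lhs => rw [hdf]
      rw [if_neg (show ¬ ((true && false) = true) from by decide)]
  · have hvalid : pvIsValidCell ni nj ((pvRowOf es 0).length : Int) (es.length : Int) = false := by
      have hnott : ¬ (pvIsValidCell ni nj ((pvRowOf es 0).length : Int) (es.length : Int) = true) := by
        simp only [pvIsValidCell, Bool.and_eq_true, decide_eq_true_eq]
        rintro ⟨⟨a, b⟩, c2, d⟩
        exact hb ⟨a, b, c2, d⟩
      simpa using hnott
    rw [hvalid]
    have hnot : ¬ (0 ≤ ni ∧ ni < (es.length : Int) ∧ 0 ≤ nj ∧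
        nj < ((pvRowOf es 0).length : Int) ∧ pvIsDigit (pvCell es ni nj) = true) :=
      fun hh => hb ⟨hh.1, hh.2.1, hh.2.2.1, hh.2.2.2.1⟩
    rw [if_neg hnot]
    rw [if_neg (show ¬ ((false && pvIsDigit (pvCell es ni nj)) = true) from by simp)]

lemma pvStepB_eq (es : List String)
    (hlen : ∀ s ∈ es, (pvRowOf es 0).length ≤ s.toList.length)
    (ni : Int) (hni0 : 0 ≤ ni) (hniH : ni < (es.length : Int))
    (nj : Int) (vals : List Int) :
    (if 0 ≤ nj ∧ nj < ((pvRowOf es 0).length : Int) then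
      match (PySem.List.pyGet?
          ((PySem.List.pyGet? (es.map (fun r => pvNumRow r.toList)) ni).getD []) nj).getD none with
      | some v => if v ∈ vals then vals else vals ++ [v]
      | none => vals
    else vals)
    = pvNStep es ((pvRowOf es 0).length : Int) (es.length : Int) vals (ni, nj) := by
  have hni : ni.toNat < es.length := by omega
  have hrowdef : pvRowOf es ni = (es[ni.toNat]'hni).toList := pvRowOf_get es ni hni0 hniH
  have hrowVals : (PySem.List.pyGet? (es.map (fun r => pvNumRow r.toList)) ni).getD []
      = pvNumRow (pvRowOf es ni) := by
    rw [PySem.List.pyGet?_eq_some_getElem _ hni0 (by simpa using hniH)]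
    rw [Option.getD_some, List.getElem_map, hrowdef]
  rw [hrowVals]
  simp only [pvNStep, pvLookup]
  by_cases hbj : 0 ≤ nj ∧ nj < ((pvRowOf es 0).length : Int)
  · rw [if_pos hbj]
    obtain ⟨h3, h4⟩ := hbj
    have hWrow : (pvRowOf es 0).length ≤ (pvRowOf es ni).length := by
      rw [hrowdef]; exact hlen _ (List.getElem_mem hni)
    have hnjlen : nj.toNat < (pvRowOf es ni).length := by omega
    have hnumlen : (pvNumRow (pvRowOf es ni)).length = (pvRowOf es ni).length :=
      pvNumRow_length _ _ le_rfl
    have hcell : pvCell es ni nj = (pvRowOf es ni).getD nj.toNat ' ' := by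
      unfold pvCell
      rw [PySem.List.pyGet?_eq_some_getElem _ h3 (by omega), Option.getD_some,
        List.getD_eq_getElem _ _ hnjlen]
    rw [PySem.List.pyGet?_eq_some_getElem _ h3 (by omega : nj < ((pvNumRow (pvRowOf es ni)).length : Int)),
      Option.getD_some, ← List.getD_eq_getElem _ none (by omega)]
    rw [pvNumRow_spec (pvRowOf es ni).length (pvRowOf es ni) le_rfl nj.toNat hnjlen]
    rw [← hcell]
    by_cases hd : pvIsDigit (pvCell es ni nj) = true
    · rw [if_pos hd, if_pos ⟨hni0, hniH, h3, h4, hd⟩]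
    · rw [if_neg hd, if_neg (fun hh => hd hh.2.2.2.2)]
  · rw [if_neg hbj]
    rw [if_neg (fun hh => hbj ⟨hh.2.2.1, hh.2.2.2.1⟩)]

lemma pvRatio_eq (l : List Int) :
    pvGearRatio l = if 2 ≤ l.length ∧ 1 < l.foldl (· * ·) 1 then l.foldl (· * ·) 1 else 0 := by
  unfold pvGearRatio
  rcases Nat.lt_or_ge l.length 2 with h | h
  · rw [if_pos h, if_neg]
    rintro ⟨h2, _⟩
    omega
  · rw [if_neg (by omega)]
    by_cases hm : 1 < l.foldl (· * ·) 1
    · rw [if_pos hm, if_pos ⟨h, hm⟩]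
    · rw [if_neg hm, if_neg (fun hh => hm hh.2)]

lemma pvStar_eq (es : List String)
    (hlen : ∀ s ∈ es, (pvRowOf es 0).length ≤ s.toList.length)
    (i j : Int) (hstar : pvCell es i j = '*') :
    List.foldl (fun found nc =>
        if pvIsValidCell nc.1 nc.2 ((pvRowOf es 0).length : Int) (es.length : Int)
            && pvIsDigit (pvCell es nc.1 nc.2) then
          PySem.Set.add found (pvFindComplete nc.1 nc.2 es)
        else found) PySem.Set.empty (pvNeighbours i j)
    = List.foldl (fun (vals : List Int) ni =>
        if 0 ≤ ni ∧ ni < (es.length : Int) then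
          List.foldl (fun (vals : List Int) nj =>
            if 0 ≤ nj ∧ nj < ((pvRowOf es 0).length : Int) then
              match (PySem.List.pyGet?
                  ((PySem.List.pyGet? (es.map (fun r => pvNumRow r.toList)) ni).getD []) nj).getD none with
              | some v => if v ∈ vals then vals else vals ++ [v]
              | none => vals
            else vals) vals [j-1, j, j+1]
        else vals) ([] : List Int) [i-1, i, i+1] := by
  rw [PySem.List.foldl_congr_mem (pvNeighbours i j) _
      (fun found c => pvNStep es ((pvRowOf es 0).length : Int) (es.length : Int) found c)
      PySem.Set.empty (fun acc x _ => pvStepA_eq es hlen acc x)]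
  have hskip : ∀ (ni : Int), ¬ (0 ≤ ni ∧ ni < (es.length : Int)) →
      ∀ (vals : List Int) (nj : Int),
        pvNStep es ((pvRowOf es 0).length : Int) (es.length : Int) vals (ni, nj) = vals := by
    intro ni hni vals nj
    simp only [pvNStep, pvLookup]
    rw [if_neg (fun hh => hni ⟨hh.1, hh.2.1⟩)]
  have hrow3 : ∀ (vals : List Int) (ni : Int), ni ∈ ([i-1, i, i+1] : List Int) →
      (if 0 ≤ ni ∧ ni < (es.length : Int) then
        List.foldl (fun (vals : List Int) nj =>
          if 0 ≤ nj ∧ nj < ((pvRowOf es 0).length : Int) then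
            match (PySem.List.pyGet?
                ((PySem.List.pyGet? (es.map (fun r => pvNumRow r.toList)) ni).getD []) nj).getD none with
            | some v => if v ∈ vals then vals else vals ++ [v]
            | none => vals
          else vals) vals [j-1, j, j+1]
      else vals)
      = List.foldl (fun (vals : List Int) nj =>
          pvNStep es ((pvRowOf es 0).length : Int) (es.length : Int) vals (ni, nj)) vals
          [j-1, j, j+1] := by
    intro vals ni _
    by_cases hni : 0 ≤ ni ∧ ni < (es.length : Int)
    · rw [if_pos hni]
      exact PySem.List.foldl_congr_mem _ _ _ _
        (fun acc x _ => pvStepB_eq es hlen ni hni.1 hni.2 x acc)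
    · rw [if_neg hni]
      simp only [List.foldl_cons, List.foldl_nil, hskip ni hni]
  rw [PySem.List.foldl_congr_mem _ _ _ _ hrow3]
  have hcenter : ∀ vals : List Int,
      pvNStep es ((pvRowOf es 0).length : Int) (es.length : Int) vals (i, j) = vals := by
    intro vals
    simp only [pvNStep, pvLookup]
    rw [if_neg]
    rintro ⟨_, _, _, _, hdig⟩
    rw [hstar] at hdig
    exact absurd hdig (by decide)
  simp only [pvNeighbours, List.foldl_cons, List.foldl_nil]
  rw [hcenter]
  rfl

-- ===== VERDICT (by name: the statement is the Claim_ definition above) =====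
theorem find_gear_ratios_spec : Claim_equal_find_gear_ratios := by
  unfold Claim_equal_find_gear_ratios
  intro es _hdom hpre
  unfold Spec_find_gear_ratios
  have hlen := pv_pre_len es hpre
  simp only [find_gear_ratios, find_gear_ratios_alt]
  by_cases hstars : (es.any fun row => PySem.Str.isIn "*" row) = true
  case neg =>
    -- no '*' anywhere: B returns [] at once, and A's sweep appends nothing
    have hnsB : (es.any fun row => PySem.Str.isIn "*" row) = false := by
      simpa using hstars
    rw [if_pos (by rw [hnsB]; rfl)]
    have hns : ∀ r ∈ es, '*' ∉ r.toList := by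
      intro r hr hmem
      have hin : PySem.Str.isIn "*" r = true := by
        rw [PySem.Str.isIn_iff_infix]
        exact (List.singleton_infix_iff '*' r.toList).mpr hmem
      have := (List.any_eq_false.mp hnsB) r hr
      rw [hin] at this
      exact this rfl
    refine Eq.trans (PySem.List.foldl_congr_mem _ _ (fun acc _ => acc) _ ?_) (List.foldl_fixed _)
    intro acc i hi
    obtain ⟨hi0, hiH⟩ := PySem.List.mem_pyRange_one.mp hi
    refine Eq.trans (PySem.List.foldl_congr_mem _ _ (fun acc _ => acc) _ ?_) (List.foldl_fixed _)
    intro acc2 j hj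
    obtain ⟨hj0, hjW⟩ := PySem.List.mem_pyRange_one.mp hj
    have hni : i.toNat < es.length := by omega
    have hrowdef : pvRowOf es i = (es[i.toNat]'hni).toList := pvRowOf_get es i hi0 hiH
    have hWrow : (pvRowOf es 0).length ≤ (pvRowOf es i).length := by
      rw [hrowdef]; exact hlen _ (List.getElem_mem hni)
    have hj' : j.toNat < (pvRowOf es i).length := by omega
    have hcell : pvCell es i j = (pvRowOf es i)[j.toNat] := by
      unfold pvCell
      rw [PySem.List.pyGet?_eq_some_getElem _ hj0 (by omega)]
      rfl
    have hneq : pvCell es i j ≠ '*' := by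
      intro heq
      apply hns (es[i.toNat]'hni) (List.getElem_mem hni)
      rw [← hrowdef, ← heq, hcell]
      exact List.getElem_mem hj'
    rw [if_pos hneq]
  case pos =>
    rw [if_neg (by rw [hstars]; decide)]
    apply PySem.List.foldl_congr_mem
    intro acc i hi
    apply PySem.List.foldl_congr_mem
    intro acc2 j hj
    by_cases hstar : pvCell es i j ≠ '*'
    · rw [if_pos hstar, if_pos hstar]
    · rw [if_neg hstar, if_neg hstar]
      have hstar' : pvCell es i j = '*' := not_not.mp hstar
      congr 1
      congr 1
      rw [pvRatio_eq]
      rw [pvStar_eq es hlen i j hstar']
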